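-- pv_equiv track=rewrite | github.com/TizianoLP/TPs-Algo1 | TP 1/unruly.py | columna_es_valida
-- ===== SOURCE A (Python) =====
-- from typing import List, Tuple, Any
--
-- Grilla = Any
--
-- def columna_es_valida(grilla: Grilla, col: int) -> bool:
--     """Devuelve un booleano indicando si la columna de la grilla denotada por
--     el índice `col` es considerada válida.
--
--     Las condiciones para que una columna sea válida son las mismas que las
--     condiciones de las filas."""
--     res0=0
--     res1=0
--     cont=" "
--     for fil in range(len(grilla[0])):
--         for col in range(len(grilla)):
--             cont+=grilla[col][fil]
--             n=grilla[col][fil]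
--             if n=="1":
--                 res1+=1
--             elif n==" ":
--                 return False
--             else:
--                 res0+=1
--         cont+=" "
--         if res0!=res1:
--             return False
--     if "111" in cont or "000" in cont:
--         return False
--     else:
--         return True
-- ===== SOURCE B (Python) =====
-- def columna_es_valida(grilla, col):
--     # Build the column-major rows once, then check validity in three separate passes.
--     filas = [[grilla[c][f] for c in range(len(grilla))] for f in range(len(grilla[0]))]
--     # Pass 1: no blank cell anywhere.
--     if any(celda == " " for fila in filas for celda in fila):
--         return False
--     # Pass 2: every fila is individually balanced (equivalent to A's cumulative check,
--     # since all prefix sums are zero iff every per-fila delta is zero).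
--     if any(sum(1 if celda == "1" else -1 for celda in fila) != 0 for fila in filas):
--         return False
--     # Pass 3: no triple run in the separator-joined content string.
--     cont = " " + "".join("".join(fila) + " " for fila in filas)
--     return "111" not in cont and "000" not in cont
-- ===== Notes on version B (the rewrite author's own statement) =====
-- stated objective: alternative
-- what changed: A's single interleaved nested loop with three early-return checks and running counters is replaced by build-the-rows-once then three independent passes (blank-cell scan, per-row balance instead of cumulative prefix balance, and a substring scan over the joined content string).
-- outside the precondition, e.g. on columna_es_valida([[' '], []], 0): A returns False, B raises IndexError; on columna_es_valida([['0', '1'], ['0']], 0): A returns False, B raises IndexError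
import Mathlib
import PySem

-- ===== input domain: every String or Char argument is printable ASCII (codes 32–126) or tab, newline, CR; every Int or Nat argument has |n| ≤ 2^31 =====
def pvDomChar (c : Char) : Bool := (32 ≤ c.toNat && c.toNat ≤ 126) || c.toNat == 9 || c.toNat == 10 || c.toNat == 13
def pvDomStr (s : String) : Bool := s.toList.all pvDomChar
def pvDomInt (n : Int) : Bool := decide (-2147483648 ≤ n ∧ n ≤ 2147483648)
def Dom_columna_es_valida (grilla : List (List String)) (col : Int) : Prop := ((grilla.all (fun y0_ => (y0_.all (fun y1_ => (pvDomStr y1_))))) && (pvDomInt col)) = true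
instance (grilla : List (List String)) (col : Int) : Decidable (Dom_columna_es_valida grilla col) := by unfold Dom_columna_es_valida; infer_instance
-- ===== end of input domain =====

-- B rebuilds A's interleaved single loop as: materialise the column-major rows once, then
-- three independent passes (blank-cell scan, per-row balance, substring scan); same results.

-- ===== PORT A =====
-- inner 'for col in range(len(grilla))' loop; none = the 'return False' on a blank cell
def pvA_colLoop (grilla : List (List String)) (fil : Int) :
    List Int → Int × Int × List Char → Option (Int × Int × List Char)
  | [], st => some st
  | c :: cs, (res0, res1, cont) =>
    let n : String := PySem.List.pyGetD (PySem.List.pyGetD grilla c []) fil ""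
    let cont' := cont ++ n.toList
    if n = "1" then pvA_colLoop grilla fil cs (res0, res1 + 1, cont')
    else if n = " " then none
    else pvA_colLoop grilla fil cs (res0 + 1, res1, cont')

-- outer 'for fil in range(len(grilla[0]))' loop; none = any early 'return False'
def pvA_filLoop (grilla : List (List String)) :
    List Int → Int × Int × List Char → Option (Int × Int × List Char)
  | [], st => some st
  | f :: fs, st =>
    match pvA_colLoop grilla f (PySem.List.pyRange 0 (grilla.length : Int) 1) st with
    | none => none
    | some (res0, res1, cont) =>
      if res0 ≠ res1 then none
      else pvA_filLoop grilla fs (res0, res1, cont ++ [' '])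

def columna_es_valida (grilla : List (List String)) (col : Int) : Bool :=
  match pvA_filLoop grilla
      (PySem.List.pyRange 0 ((PySem.List.pyGetD grilla 0 []).length : Int) 1)
      (0, 0, [' ']) with
  | none => false
  | some (_, _, cont) =>
    if PySem.Chars.isIn "111".toList cont || PySem.Chars.isIn "000".toList cont then false
    else true

-- ===== PORT B =====
-- filas = [[grilla[c][f] for c in range(len(grilla))] for f in range(len(grilla[0]))]
def pvB_filas (grilla : List (List String)) : List (List String) :=
  (PySem.List.pyRange 0 ((PySem.List.pyGetD grilla 0 []).length : Int) 1).map (fun f =>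
    (PySem.List.pyRange 0 (grilla.length : Int) 1).map (fun c =>
      PySem.List.pyGetD (PySem.List.pyGetD grilla c []) f ""))

def columna_es_valida_alt (grilla : List (List String)) (col : Int) : Bool :=
  let filas := pvB_filas grilla
  if filas.any (fun fila => fila.any (fun celda => celda == " ")) then false
  else if filas.any (fun fila =>
      !((fila.map (fun celda => if celda = "1" then (1 : Int) else -1)).sum == 0)) then false
  else
    let cont : List Char :=
      [' '] ++ (filas.map (fun fila => (fila.map String.toList).flatten ++ [' '])).flatten
    !(PySem.Chars.isIn "111".toList cont) && !(PySem.Chars.isIn "000".toList cont)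

-- ===== PRECONDITION & SPEC =====
-- Pre_ excludes the inputs where A hits an IndexError (empty grilla, or a row shorter than
-- grilla[0]); on some ragged grids A returns False early before reaching the bad index, but
-- B's build-first pass naturally raises there, so those ragged grids are excluded too.
def Pre_columna_es_valida (grilla : List (List String)) (col : Int) : Prop :=
  grilla ≠ [] ∧ ∀ fila ∈ grilla, (grilla.headD []).length ≤ fila.length
instance (grilla : List (List String)) (col : Int) : Decidable (Pre_columna_es_valida grilla col) := by unfold Pre_columna_es_valida; infer_instance

def pvWitness_columna_es_valida : List (List String) × Int := ([["1", "0"], ["0", "1"]], 0)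

def Spec_columna_es_valida (grilla : List (List String)) (col : Int) (out : Bool) : Prop := out = columna_es_valida_alt grilla col
instance (grilla : List (List String)) (col : Int) (out : Bool) : Decidable (Spec_columna_es_valida grilla col out) := by unfold Spec_columna_es_valida; infer_instance

-- ===== CLAIM (what is proved, stated in full; the proofs are below) =====
def Claim_equal_columna_es_valida : Prop := ∀ (grilla : List (List String)) (col : Int), Dom_columna_es_valida grilla col → Pre_columna_es_valida grilla col → Spec_columna_es_valida grilla col (columna_es_valida grilla col)

-- ===== LEMMAS AND PROOFS =====

-- proof-side names for the cell and row of the ports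
def pvCell (grilla : List (List String)) (c f : Int) : String :=
  PySem.List.pyGetD (PySem.List.pyGetD grilla c []) f ""

def pvRow (grilla : List (List String)) (f : Int) : List String :=
  (PySem.List.pyRange 0 (grilla.length : Int) 1).map (fun c => pvCell grilla c f)

def pvRowBad (grilla : List (List String)) (f : Int) : Bool :=
  (pvRow grilla f).any (fun s => s == " ") ||
  !((pvRow grilla f).countP (fun s => s == "1") == (pvRow grilla f).countP (fun s => !(s == "1")))

lemma pvA_colLoop_spec (g : List (List String)) (f : Int) :
    ∀ (cs : List Int) (r0 r1 : Int) (cont : List Char),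
    pvA_colLoop g f cs (r0, r1, cont) =
      if cs.any (fun c => pvCell g c f == " ") then none
      else some (r0 + (cs.countP (fun c => !(pvCell g c f == "1")) : Int),
                 r1 + (cs.countP (fun c => pvCell g c f == "1") : Int),
                 cont ++ (cs.map (fun c => (pvCell g c f).toList)).flatten) := by
  intro cs
  induction cs with
  | nil => intro r0 r1 cont; simp [pvA_colLoop]
  | cons c cs ih =>
    intro r0 r1 cont
    have hun : pvA_colLoop g f (c :: cs) (r0, r1, cont) =
        (if pvCell g c f = "1" then pvA_colLoop g f cs (r0, r1 + 1, cont ++ (pvCell g c f).toList)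
         else if pvCell g c f = " " then none
         else pvA_colLoop g f cs (r0 + 1, r1, cont ++ (pvCell g c f).toList)) := rfl
    rw [hun]
    by_cases h1 : pvCell g c f = "1"
    · have hPc : (pvCell g c f == " ") = false := by simp [h1]
      have h1b : (pvCell g c f == "1") = true := by simp [h1]
      rw [if_pos h1, ih, List.any_cons, hPc, Bool.false_or]
      by_cases hany : (cs.any fun x => pvCell g x f == " ") = true
      · rw [if_pos hany, if_pos hany]
      · rw [if_neg hany, if_neg hany]
        simp only [List.countP_cons, h1b, List.map_cons, List.flatten_cons, Bool.not_true, Option.some.injEq, Prod.mk.injEq]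
        refine ⟨by push_cast; ring, by push_cast; ring, by rw [List.append_assoc]⟩
    · by_cases hs : pvCell g c f = " "
      · have hPc : (pvCell g c f == " ") = true := by simp [hs]
        rw [if_neg h1, if_pos hs, List.any_cons, hPc, Bool.true_or, if_pos rfl]
      · have hPc : (pvCell g c f == " ") = false := by simp [hs]
        have h1b : (pvCell g c f == "1") = false := by simp [h1]
        rw [if_neg h1, if_neg hs, ih, List.any_cons, hPc, Bool.false_or]
        by_cases hany : (cs.any fun x => pvCell g x f == " ") = true
        · rw [if_pos hany, if_pos hany]
        · rw [if_neg hany, if_neg hany]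
          simp only [List.countP_cons, h1b, List.map_cons, List.flatten_cons, Bool.not_false, Option.some.injEq, Prod.mk.injEq]
          refine ⟨by push_cast; ring, by push_cast; ring, by rw [List.append_assoc]⟩

lemma pvA_filLoop_spec (g : List (List String)) :
    ∀ (fs : List Int) (r0 r1 : Int) (cont : List Char), r0 = r1 →
    (fs.any (pvRowBad g) = true → pvA_filLoop g fs (r0, r1, cont) = none) ∧
    (fs.any (pvRowBad g) = false → ∃ r : Int × Int,
      pvA_filLoop g fs (r0, r1, cont) =
        some (r.1, r.2,
          cont ++ (fs.map (fun f => ((pvRow g f).map String.toList).flatten ++ [' '])).flatten)) := by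
  intro fs
  induction fs with
  | nil =>
    intro r0 r1 cont h
    refine ⟨by simp, fun _ => ⟨(r0, r1), by simp [pvA_filLoop]⟩⟩
  | cons f fs ih =>
    intro r0 r1 cont h
    have hcol := pvA_colLoop_spec g f (PySem.List.pyRange 0 (g.length : Int) 1) r0 r1 cont
    have hrwS : ((PySem.List.pyRange 0 (g.length : Int) 1).any fun c => pvCell g c f == " ") =
        (pvRow g f).any (fun s => s == " ") := by
      simp [pvRow, List.any_map, Function.comp_def]
    have hcp1 : List.countP (fun c => pvCell g c f == "1") (PySem.List.pyRange 0 (g.length : Int) 1) =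
        (pvRow g f).countP (fun s => s == "1") := by
      simp [pvRow, List.countP_map, Function.comp_def]
    have hcpN : List.countP (fun c => !(pvCell g c f == "1")) (PySem.List.pyRange 0 (g.length : Int) 1) =
        (pvRow g f).countP (fun s => !(s == "1")) := by
      simp [pvRow, List.countP_map, Function.comp_def]
    rcases Bool.eq_false_or_eq_true ((pvRow g f).any (fun s => s == " ")) with hsp | hspf
    · -- blank cell in this row: inner loop returns none
      have : pvA_filLoop g (f :: fs) (r0, r1, cont) = none := by
        simp only [pvA_filLoop]
        rw [hcol, if_pos (by rw [hrwS]; exact hsp)]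
      constructor
      · intro _; exact this
      · intro hall; simp [List.any_cons, pvRowBad, hsp] at hall
    · -- no blank cell in this row
      have hcol' : pvA_colLoop g f (PySem.List.pyRange 0 (g.length : Int) 1) (r0, r1, cont) =
          some (r0 + ((pvRow g f).countP (fun s => !(s == "1")) : Int),
                r1 + ((pvRow g f).countP (fun s => s == "1") : Int),
                cont ++ (((pvRow g f)).map String.toList).flatten) := by
        rw [hcol, if_neg (by rw [hrwS, hspf]; simp)]
        rw [hcpN, hcp1]
        congr 1
        simp [pvRow, List.map_map, Function.comp_def]
      by_cases hbal : (pvRow g f).countP (fun s => s == "1") = (pvRow g f).countP (fun s => !(s == "1"))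
      · -- balanced row: recurse
        have hnext : pvA_filLoop g (f :: fs) (r0, r1, cont) =
            pvA_filLoop g fs (r0 + ((pvRow g f).countP (fun s => !(s == "1")) : Int),
              r1 + ((pvRow g f).countP (fun s => s == "1") : Int),
              (cont ++ ((pvRow g f).map String.toList).flatten) ++ [' ']) := by
          simp only [pvA_filLoop]
          rw [hcol']
          dsimp only
          rw [if_neg (by rw [h, hbal]; omega)]
        have heq : r0 + ((pvRow g f).countP (fun s => !(s == "1")) : Int) =
            r1 + ((pvRow g f).countP (fun s => s == "1") : Int) := by
          rw [h, hbal]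
        have ihh := ih _ _ ((cont ++ ((pvRow g f).map String.toList).flatten) ++ [' ']) heq
        have hbadf : pvRowBad g f = false := by
          simp [pvRowBad, hspf, hbal]
        constructor
        · intro hany
          rw [hnext]
          apply ihh.1
          simpa [List.any_cons, hbadf] using hany
        · intro hall
          rw [hnext]
          obtain ⟨r, hr⟩ := ihh.2 (by simpa [List.any_cons, hbadf] using hall)
          exact ⟨r, by rw [hr]; simp⟩
      · -- unbalanced row: res0 != res1 → none
        have : pvA_filLoop g (f :: fs) (r0, r1, cont) = none := by
          simp only [pvA_filLoop]
          rw [hcol']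
          dsimp only
          rw [if_pos (by rw [h]; omega)]
        constructor
        · intro _; exact this
        · intro hall
          exfalso
          simp [List.any_cons, pvRowBad, hspf] at hall
          exact hbal hall.1
lemma pvSum_eq_counts (l : List String) :
    (l.map (fun celda => if celda = "1" then (1 : Int) else -1)).sum =
      (l.countP (fun s => s == "1") : Int) - (l.countP (fun s => !(s == "1")) : Int) := by
  induction l with
  | nil => simp
  | cons x xs ih =>
    by_cases hx : x = "1"
    · simp [List.countP_cons, hx, ih]; push_cast; ring
    · simp [List.countP_cons, hx, ih]; push_cast; ring

lemma pvImb (fila : List String) :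
    (!((fila.map (fun celda => if celda = "1" then (1 : Int) else -1)).sum == 0)) =
      (!(fila.countP (fun s => s == "1") == fila.countP (fun s => !(s == "1")))) := by
  by_cases hb : fila.countP (fun s => s == "1") = fila.countP (fun s => !(s == "1"))
  · simp [pvSum_eq_counts, hb]
  · have h2 : (fila.countP (fun s => s == "1") : Int) - fila.countP (fun s => !(s == "1")) ≠ 0 := by
      intro h0; exact hb (by omega)
    simp [pvSum_eq_counts, h2, hb]

lemma pvIfCheck (a b : Bool) :
    (if (a || b) = true then false else true) = (!a && !b) := by
  cases a <;> cases b <;> simp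

lemma pvFilas_eq (g : List (List String)) :
    pvB_filas g =
      (PySem.List.pyRange 0 ((PySem.List.pyGetD g 0 []).length : Int) 1).map (pvRow g) := by
  simp [pvB_filas, pvRow, pvCell]

-- any over a disjunction splits
lemma pvAny_or {α : Type} (l : List α) (p q : α → Bool) :
    l.any (fun x => p x || q x) = (l.any p || l.any q) := by
  induction l with
  | nil => simp
  | cons x xs ih => cases hp : p x <;> cases hq : q x <;> simp [List.any_cons, ih, hp, hq]

-- ===== VERDICT (by name: the statement is the Claim_ definition above) =====
theorem columna_es_valida_spec : Claim_equal_columna_es_valida := by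
  intro grilla col _ _
  unfold Spec_columna_es_valida columna_es_valida columna_es_valida_alt
  rw [pvFilas_eq]
  set fs := PySem.List.pyRange 0 ((PySem.List.pyGetD grilla 0 []).length : Int) 1 with hfs
  have hspec := pvA_filLoop_spec grilla fs 0 0 [' '] rfl
  have hB1 : ((fs.map (pvRow grilla)).any (fun fila => fila.any (fun celda => celda == " "))) =
      fs.any (fun f => (pvRow grilla f).any (fun s => s == " ")) := by
    simp only [List.any_map, Function.comp_def]
  have hB2 : ((fs.map (pvRow grilla)).any (fun fila =>
      !((fila.map (fun celda => if celda = "1" then (1 : Int) else -1)).sum == 0))) =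
      fs.any (fun f => !((pvRow grilla f).countP (fun s => s == "1") ==
        (pvRow grilla f).countP (fun s => !(s == "1")))) := by
    simp only [List.any_map, Function.comp_def, pvImb]
  have hbadsplit : fs.any (pvRowBad grilla) =
      (fs.any (fun f => (pvRow grilla f).any (fun s => s == " ")) ||
       fs.any (fun f => !((pvRow grilla f).countP (fun s => s == "1") ==
        (pvRow grilla f).countP (fun s => !(s == "1"))))) := by
    unfold pvRowBad
    exact pvAny_or fs _ _
  rcases Bool.eq_false_or_eq_true (fs.any (pvRowBad grilla)) with hbadT | hbad
  · -- some bad row: A's loop returns none; B's first or second pass fires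
    rw [hspec.1 hbadT]
    dsimp only
    rw [hB1, hB2]
    rw [hbadsplit] at hbadT
    rcases Bool.or_eq_true_iff.mp hbadT with h1 | h1
    · rw [h1]; simp
    · rcases Bool.eq_false_or_eq_true (fs.any (fun f => (pvRow grilla f).any (fun s => s == " "))) with hsp | hsp
      · rw [hsp]; simp
      · rw [hsp, h1]; simp
  · -- no bad row: both reach the substring check on the same cont
    obtain ⟨r, hr⟩ := hspec.2 hbad
    rw [hr]
    dsimp only
    rw [hB1, hB2]
    rw [hbadsplit] at hbad
    have hb := Bool.or_eq_false_iff.mp hbad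
    rw [hb.1, hb.2]
    simp only [Bool.false_eq_true, if_false]
    simp only [List.map_map, Function.comp_def]
    exact pvIfCheck _ _
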